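-- pv_equiv track=rewrite | github.com/osbock/dymo_picture_print | dymo_print.py | get_hilbert_curve
-- ===== SOURCE A (Python) =====
-- def get_hilbert_curve(width, height):
--     """
--     Generate Hilbert curve coordinates (x, y) for a rectangle.
--     Since Hilbert curves are for powers of 2, we use a larger power of 2
--     and filter out coordinates outside the rectangle.
--     """
--     size = 1
--     while size < width or size < height:
--         size *= 2
--
--     def rot(n, x, y, rx, ry):
--         if ry == 0:
--             if rx == 1:
--                 x = n - 1 - x
--                 y = n - 1 - y
--             return y, x
--         return x, y
--
--     def d2xy(n, d):
--         t = d
--         x = y = 0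
--         s = 1
--         while s < n:
--             rx = 1 & (t // 2)
--             ry = 1 & (t ^ rx)
--             x, y = rot(s, x, y, rx, ry)
--             x += s * rx
--             y += s * ry
--             t //= 4
--             s *= 2
--         return x, y
--
--     for d in range(size * size):
--         x, y = d2xy(size, d)
--         if x < width and y < height:
--             yield x, y
-- ===== SOURCE B (Python) =====
-- def get_hilbert_curve(width, height):
--     """Same cells in the same Hilbert order, by top-down recursive subdivision
--     that prunes sub-squares lying entirely outside the width x height rectangle."""
--     size = 1
--     while size < width or size < height:
--         size *= 2
--
--     def rec(s, ox, oy, a, b, c, d):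
--         # square of side s; local (x,y) in [0,s)^2 maps to
--         # global (ox + a*x + b*y, oy + c*x + d*y)
--         minx = ox + min(0, a * (s - 1)) + min(0, b * (s - 1))
--         miny = oy + min(0, c * (s - 1)) + min(0, d * (s - 1))
--         if minx >= width or miny >= height:
--             return
--         if s == 1:
--             yield ox, oy
--             return
--         h = s // 2
--         # quadrant 0: (x,y) -> (y,x)
--         yield from rec(h, ox, oy, b, a, d, c)
--         # quadrant 1: (x,y) -> (x, y+h)
--         yield from rec(h, ox + b * h, oy + d * h, a, b, c, d)
--         # quadrant 2: (x,y) -> (x+h, y+h)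
--         yield from rec(h, ox + a * h + b * h, oy + c * h + d * h, a, b, c, d)
--         # quadrant 3: (x,y) -> (2h-1-y, h-1-x)
--         yield from rec(h, ox + a * (2 * h - 1) + b * (h - 1),
--                        oy + c * (2 * h - 1) + d * (h - 1), -b, -a, -d, -c)
--
--     yield from rec(size, 0, 0, 1, 0, 0, 1)
-- ===== Notes on version B (the rewrite author's own statement) =====
-- stated objective: faster
-- what changed: A decodes every cell of the enclosing power-of-two square from its curve index with an O(log size) bit loop and filters; B recursively subdivides the square into the four Hilbert quadrants (carrying an affine placement of each sub-square) and prunes whole sub-squares whose minimum corner already lies outside the rectangle.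
import Mathlib
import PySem

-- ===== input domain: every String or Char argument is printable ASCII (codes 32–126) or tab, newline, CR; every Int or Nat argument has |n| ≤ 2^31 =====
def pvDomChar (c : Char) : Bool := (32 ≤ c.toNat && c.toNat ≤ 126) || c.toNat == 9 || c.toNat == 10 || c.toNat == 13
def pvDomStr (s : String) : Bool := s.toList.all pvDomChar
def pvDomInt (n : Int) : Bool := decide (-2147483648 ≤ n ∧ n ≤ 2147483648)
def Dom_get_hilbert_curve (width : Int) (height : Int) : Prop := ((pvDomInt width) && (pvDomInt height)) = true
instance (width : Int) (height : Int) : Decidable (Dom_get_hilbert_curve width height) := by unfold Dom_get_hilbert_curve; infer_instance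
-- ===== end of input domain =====

-- B replaces A's per-cell bit-decoding scan of the whole enclosing power-of-two square by a
-- top-down recursive Hilbert subdivision that prunes sub-squares lying outside the rectangle
-- (objective: faster). Both Pythons are generators; equivalence is about the yielded sequence.

-- ===== PORT A =====
-- `while size < width or size < height: size *= 2` (positivity of size threaded for termination)
def pySizeLoopA (width height size : Int) (hs : 0 < size) : Int :=
  if hc : size < width ∨ size < height then
    pySizeLoopA width height (size * 2) (Int.mul_pos hs (by decide))
  else size
termination_by (max width height - size).toNat
decreasing_by
  exact (Int.toNat_lt_toNat (Int.sub_pos.mpr (hc.elim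
      (fun hh => lt_of_lt_of_le hh (le_max_left width height))
      (fun hh => lt_of_lt_of_le hh (le_max_right width height))))).mpr
    (Int.sub_lt_sub_left (lt_mul_of_one_lt_right hs one_lt_two) _)

-- `rot`: the in-place update `x = n-1-x; y = n-1-y` followed by `return y, x` is written directly
def pyRotA (n x y rx ry : Int) : Int × Int :=
  if ry = 0 then
    if rx = 1 then (n - 1 - y, n - 1 - x) else (y, x)
  else (x, y)

-- `d2xy`'s while loop
def pyD2xyLoopA (n t x y s : Int) (hs : 0 < s) : Int × Int :=
  if hlt : s < n then
    let rx := PySem.Int.band 1 (PySem.Int.floordiv t 2)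
    let ry := PySem.Int.band 1 (PySem.Int.bxor t rx)
    let p := pyRotA s x y rx ry
    pyD2xyLoopA n (PySem.Int.floordiv t 4) (p.1 + s * rx) (p.2 + s * ry) (s * 2)
      (Int.mul_pos hs (by decide))
  else (x, y)
termination_by (n - s).toNat
decreasing_by
  exact (Int.toNat_lt_toNat (Int.sub_pos.mpr hlt)).mpr
    (Int.sub_lt_sub_left (lt_mul_of_one_lt_right hs one_lt_two) n)

def pyD2xyA (n d : Int) : Int × Int := pyD2xyLoopA n d 0 0 1 (by decide)

def get_hilbert_curve (width : Int) (height : Int) : List (List Int) :=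
  let size := pySizeLoopA width height 1 (by decide)
  (PySem.List.pyRange 0 (size * size) 1).foldl
    (fun acc d =>
      let p := pyD2xyA size d
      if p.1 < width ∧ p.2 < height then acc ++ [[p.1, p.2]] else acc) []

-- ===== PORT B =====
-- same first loop as Source B's `while size < width or size < height`
def pySizeLoopB (width height size : Int) (hs : 0 < size) : Int :=
  if hc : size < width ∨ size < height then
    pySizeLoopB width height (size * 2) (Int.mul_pos hs (by decide))
  else size
termination_by (max width height - size).toNat
decreasing_by
  exact (Int.toNat_lt_toNat (Int.sub_pos.mpr (hc.elim
      (fun hh => lt_of_lt_of_le hh (le_max_left width height))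
      (fun hh => lt_of_lt_of_le hh (le_max_right width height))))).mpr
    (Int.sub_lt_sub_left (lt_mul_of_one_lt_right hs one_lt_two) _)

-- Source B's `rec(s, ox, oy, a, b, c, d)` generator; `fuel` only makes the structural
-- recursion total (the caller passes enough for every reachable call; fuel 0 is never hit)
def pyRecB (fuel : Nat) (width height s ox oy a b c d : Int) : List (List Int) :=
  match fuel with
  | 0 => []
  | fuel + 1 =>
    let minx := ox + min 0 (a * (s - 1)) + min 0 (b * (s - 1))
    let miny := oy + min 0 (c * (s - 1)) + min 0 (d * (s - 1))
    if width ≤ minx ∨ height ≤ miny then []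
    else if s = 1 then [[ox, oy]]
    else
      let h := PySem.Int.floordiv s 2
      pyRecB fuel width height h ox oy b a d c ++
      pyRecB fuel width height h (ox + b * h) (oy + d * h) a b c d ++
      pyRecB fuel width height h (ox + a * h + b * h) (oy + c * h + d * h) a b c d ++
      pyRecB fuel width height h (ox + a * (2 * h - 1) + b * (h - 1))
        (oy + c * (2 * h - 1) + d * (h - 1)) (-b) (-a) (-d) (-c)

def get_hilbert_curve_alt (width : Int) (height : Int) : List (List Int) :=
  let size := pySizeLoopB width height 1 (by decide)
  pyRecB size.toNat width height size 0 0 1 0 0 1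

-- ===== PRECONDITION & SPEC =====
def Spec_get_hilbert_curve (width : Int) (height : Int) (out : List (List Int)) : Prop := out = get_hilbert_curve_alt width height
instance (width : Int) (height : Int) (out : List (List Int)) : Decidable (Spec_get_hilbert_curve width height out) := by unfold Spec_get_hilbert_curve; infer_instance

-- ===== CLAIM (what is proved, stated in full; the proofs are below) =====
def Claim_equal_get_hilbert_curve : Prop := ∀ (width : Int) (height : Int), Dom_get_hilbert_curve width height → Spec_get_hilbert_curve width height (get_hilbert_curve width height)

-- ===== LEMMAS AND PROOFS =====

-- one iteration of A's d2xy loop, as a function of the state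
def stepR (s t : Int) (p : Int × Int) : Int × Int :=
  let rx := PySem.Int.band 1 (PySem.Int.floordiv t 2)
  let ry := PySem.Int.band 1 (PySem.Int.bxor t rx)
  let q := pyRotA s p.1 p.2 rx ry
  (q.1 + s * rx, q.2 + s * ry)

-- A's loop unrolled k times (bottom-up order)
def Ek : Nat → Int → Int → Int × Int → Int × Int
  | 0, _, _, p => p
  | k+1, s, t, p => Ek k (s * 2) (PySem.Int.floordiv t 4) (stepR s t p)

-- reference value: d2xy on a 2^k square, top step applied last
def Dref : Nat → Int → Int × Int
  | 0, _ => (0, 0)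
  | k+1, t => stepR (2 ^ k) (PySem.Int.floordiv t (4 ^ k)) (Dref k t)

-- an affine signed-permutation placement of a sub-square, as B maintains it
def applyT (ox oy a b c d : Int) (p : Int × Int) : Int × Int :=
  (ox + a * p.1 + b * p.2, oy + c * p.1 + d * p.2)

theorem loop_eq_Ek (k : Nat) : ∀ (s t x y : Int) (hs : 0 < s),
    pyD2xyLoopA (s * 2 ^ k) t x y s hs = Ek k s t (x, y) := by
  induction k with
  | zero =>
    intro s t x y hs
    rw [pyD2xyLoopA]
    simp [Ek]
  | succ k ih =>
    intro s t x y hs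
    rw [pyD2xyLoopA]
    have hp : (0:Int) < 2 ^ k := pow_pos (by omega) k
    have hcond : s < s * 2 ^ (k+1) := by
      have : (2:Int) ^ (k+1) = 2 * 2 ^ k := by ring
      nlinarith
    rw [dif_pos hcond]
    simp only [Ek]
    rw [← Prod.mk.eta (p := stepR s t (x, y)), ← ih (s*2) (PySem.Int.floordiv t 4) _ _ (by omega)]
    have harr : s * 2 ^ (k + 1) = (s * 2) * 2 ^ k := by ring
    congr 1

theorem fd_comp (t : Int) (k : Nat) :
    PySem.Int.floordiv (PySem.Int.floordiv t 4) (4 ^ k) = PySem.Int.floordiv t (4 ^ (k+1)) := by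
  have h4 : (0:Int) < 4 := by omega
  have hp : (0:Int) < 4 ^ k := pow_pos h4 k
  have hp1 : (0:Int) < 4 ^ (k+1) := pow_pos h4 (k+1)
  rw [PySem.Int.floordiv_eq_ediv_of_pos h4, PySem.Int.floordiv_eq_ediv_of_pos hp,
      PySem.Int.floordiv_eq_ediv_of_pos hp1, Int.ediv_ediv_of_nonneg (by omega), pow_succ, mul_comm]

theorem fd_nonneg (t b : Int) (ht : 0 ≤ t) (hb : 0 < b) : 0 ≤ PySem.Int.floordiv t b := by
  rw [PySem.Int.floordiv_eq_ediv_of_pos hb]; exact Int.ediv_nonneg ht (by omega)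

theorem step_last (k : Nat) : ∀ (s t : Int) (p : Int × Int), 0 ≤ t →
    Ek (k + 1) s t p = stepR (s * 2 ^ k) (PySem.Int.floordiv t (4 ^ k)) (Ek k s t p) := by
  induction k with
  | zero => intro s t p ht; simp [Ek, PySem.Int.floordiv]
  | succ k ih =>
    intro s t p ht
    show Ek (k+1) (s*2) (PySem.Int.floordiv t 4) (stepR s t p) = _
    rw [ih (s*2) (PySem.Int.floordiv t 4) (stepR s t p) (fd_nonneg t 4 ht (by omega))]
    rw [fd_comp t k]
    have : s * 2 * 2 ^ k = s * 2 ^ (k+1) := by ring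
    rw [this]
    rfl

theorem Ek_one_eq_Dref (k : Nat) (t : Int) (ht : 0 ≤ t) : Ek k 1 t (0, 0) = Dref k t := by
  induction k with
  | zero => rfl
  | succ k ih =>
    rw [step_last k 1 t (0,0) ht, ih]
    simp [Dref]

theorem band_one' (x : Int) : PySem.Int.band 1 x = PySem.Int.mod x 2 := by
  rw [PySem.Int.band_comm, PySem.Int.band_one]

theorem stepR_cases (s t : Int) (p : Int × Int) (ht : 0 ≤ t) :
    stepR s t p =
      if t % 4 = 0 then (p.2, p.1)
      else if t % 4 = 1 then (p.1, p.2 + s)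
      else if t % 4 = 2 then (p.1 + s, p.2 + s)
      else (2 * s - 1 - p.2, s - 1 - p.1) := by
  have h2 : (0:Int) < 2 := by omega
  have hrx : PySem.Int.band 1 (PySem.Int.floordiv t 2) = (t % 4) / 2 := by
    rw [band_one', PySem.Int.floordiv_eq_ediv_of_pos h2, PySem.Int.mod_eq_emod_of_pos h2]
    omega
  have hrx2 : PySem.Int.band 1 (t / 2) = (t % 4) / 2 := by
    rw [band_one', PySem.Int.mod_eq_emod_of_pos h2]; omega
  have hry0 : PySem.Int.band 1 t = t % 2 := by
    rw [band_one', PySem.Int.mod_eq_emod_of_pos h2]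
  have hry1 : PySem.Int.band 1 (PySem.Int.bxor t 1) = 1 - t % 2 := by
    rw [PySem.Int.bxor_of_nonneg ht (by omega)]
    simp only [Int.toNat_one]
    rw [band_one', PySem.Int.mod_eq_emod_of_pos h2]
    have hcast : ((t.toNat ^^^ 1 : Nat) : Int) % 2 = (((t.toNat ^^^ 1) % 2 : Nat) : Int) := by
      push_cast; ring
    rw [hcast]
    have hx : (t.toNat ^^^ 1) % 2 = (t.toNat % 2) ^^^ (1 % 2) := by
      simpa using Nat.xor_mod_two_pow (n := 1) (a := t.toNat) (b := 1)
    rw [hx]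
    rcases (by omega : t % 2 = 0 ∨ t % 2 = 1) with h | h <;>
      (have hm : t.toNat % 2 = (t % 2).toNat := by omega) <;> rw [hm, h] <;> simp
  rcases (by omega : t % 4 = 0 ∨ t % 4 = 1 ∨ t % 4 = 2 ∨ t % 4 = 3) with h | h | h | h
  · have hrx0 : (t % 4) / 2 = 0 := by omega
    have ht2 : t % 2 = 0 := by omega
    simp [stepR, pyRotA, hrx2, PySem.Int.bxor_zero, hry0, ht2, h]
  · have hrx0 : (t % 4) / 2 = 0 := by omega
    have ht2 : t % 2 = 1 := by omega
    simp [stepR, pyRotA, hrx2, PySem.Int.bxor_zero, hry0, ht2, h]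
  · have ht2 : t % 2 = 0 := by omega
    simp [stepR, pyRotA, hrx2, hry1, ht2, h]
  · have ht2 : t % 2 = 1 := by omega
    simp [stepR, pyRotA, hrx2, hry1, ht2, h]
    ring

theorem Dref_bounds (k : Nat) : ∀ (t : Int), 0 ≤ t →
    0 ≤ (Dref k t).1 ∧ (Dref k t).1 < 2 ^ k ∧ 0 ≤ (Dref k t).2 ∧ (Dref k t).2 < 2 ^ k := by
  induction k with
  | zero => intro t ht; simp [Dref]
  | succ k ih =>
    intro t ht
    have h4 : (0:Int) < 4 ^ k := pow_pos (by omega) k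
    have ht' : 0 ≤ PySem.Int.floordiv t (4 ^ k) := fd_nonneg t _ ht h4
    have hb := ih t ht
    rw [Dref, stepR_cases _ _ _ ht']
    have hp : (0:Int) < 2 ^ k := pow_pos (by omega) k
    have h2 : (2:Int) ^ (k+1) = 2 * 2 ^ k := by ring
    split_ifs <;> refine ⟨?_, ?_, ?_, ?_⟩ <;> simp <;> omega

theorem Dref_high_bits (k : Nat) : ∀ (q r : Int), 0 ≤ q → 0 ≤ r →
    Dref k (q * 4 ^ k + r) = Dref k r := by
  induction k with
  | zero => intro q r hq hr; rfl
  | succ k ih =>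
    intro q r hq hr
    have h4 : (0:Int) < 4 ^ k := pow_pos (by omega) k
    have harr : q * 4 ^ (k+1) + r = (4 * q) * 4 ^ k + r := by ring
    rw [Dref, Dref, harr, ih (4*q) r (by omega) hr]
    have hdiv : PySem.Int.floordiv ((4 * q) * 4 ^ k + r) (4 ^ k)
        = 4 * q + PySem.Int.floordiv r (4 ^ k) := by
      rw [PySem.Int.floordiv_eq_ediv_of_pos h4, PySem.Int.floordiv_eq_ediv_of_pos h4]
      rw [show 4 * q * 4 ^ k + r = r + (4 * q) * 4 ^ k from by ring,
          Int.add_mul_ediv_right _ _ (by omega : (4:Int) ^ k ≠ 0)]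
      ring
    rw [hdiv]
    have hr' : 0 ≤ PySem.Int.floordiv r (4 ^ k) := fd_nonneg r _ hr h4
    rw [stepR_cases _ _ _ (by omega), stepR_cases _ _ _ hr']
    have hmod : (4 * q + PySem.Int.floordiv r (4 ^ k)) % 4 = PySem.Int.floordiv r (4 ^ k) % 4 := by
      omega
    rw [hmod]

theorem sizeAB (width height : Int) : ∀ (size : Int) (hs : 0 < size),
    pySizeLoopA width height size hs = pySizeLoopB width height size hs := by
  intro size hs
  fun_induction pySizeLoopA with
  | case1 s hs hc ih => rw [pySizeLoopB, dif_pos hc]; exact ih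
  | case2 s hs hc => rw [pySizeLoopB, dif_neg hc]

theorem size_pow (width height : Int) : ∀ (size : Int) (hs : 0 < size),
    (∃ j : Nat, size = 2 ^ j) → ∃ k : Nat, pySizeLoopA width height size hs = 2 ^ k := by
  intro size hs
  fun_induction pySizeLoopA with
  | case1 s hs hc ih =>
    intro ⟨j, hj⟩
    exact ih ⟨j + 1, by rw [hj]; ring⟩
  | case2 s hs hc => intro h; exact h

theorem min_aff (a x s1 : Int) (h0 : 0 ≤ x) (h1 : x ≤ s1) : min 0 (a * s1) ≤ a * x := by
  rcases le_total 0 a with ha | ha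
  · exact le_trans (min_le_left _ _) (mul_nonneg ha h0)
  · exact le_trans (min_le_right _ _) (mul_le_mul_of_nonpos_left h1 ha)

-- every cell of the square maps at or beyond the transform's minimum corner

theorem prune_ok (w h ox oy a b c d s1 : Int) (p : Int × Int)
    (hx0 : 0 ≤ p.1) (hx1 : p.1 ≤ s1) (hy0 : 0 ≤ p.2) (hy1 : p.2 ≤ s1)
    (hpr : w ≤ ox + min 0 (a * s1) + min 0 (b * s1) ∨ h ≤ oy + min 0 (c * s1) + min 0 (d * s1)) :
    ¬ ((applyT ox oy a b c d p).1 < w ∧ (applyT ox oy a b c d p).2 < h) := by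
  have h1 := min_aff a p.1 s1 hx0 hx1
  have h2 := min_aff b p.2 s1 hy0 hy1
  have h3 := min_aff c p.1 s1 hx0 hx1
  have h4 := min_aff d p.2 s1 hy0 hy1
  simp only [applyT]
  omega

theorem recB_eq (k : Nat) : ∀ (fuel : Nat) (w h ox oy a b c d : Int), k < fuel →
    pyRecB fuel w h (2 ^ k) ox oy a b c d =
      (List.range (4 ^ k)).filterMap (fun (r : Nat) =>
        if (applyT ox oy a b c d (Dref k (r : Int))).1 < w ∧ (applyT ox oy a b c d (Dref k (r : Int))).2 < h
        then some [(applyT ox oy a b c d (Dref k (r : Int))).1, (applyT ox oy a b c d (Dref k (r : Int))).2]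
        else none) := by
  induction k with
  | zero =>
    intro fuel w h ox oy a b c d hfuel
    match fuel, hfuel with
    | f + 1, _ =>
    rw [pyRecB]
    norm_num [Dref, applyT]
    split_ifs <;> first | rfl | omega
  | succ k ih =>
    intro fuel w h ox oy a b c d hfuel
    match fuel, hfuel with
    | f + 1, hfuel =>
    have hk : (0:Int) < 2 ^ k := pow_pos (by omega) k
    have h2k : (2:Int) ^ (k+1) = 2 * 2 ^ k := by ring
    have h4k : (0:Int) < 4 ^ k := pow_pos (by omega) k
    have hfd : PySem.Int.floordiv ((2:Int) ^ (k+1)) 2 = 2 ^ k := by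
      rw [PySem.Int.floordiv_eq_ediv_of_pos (by omega : (0:Int) < 2), h2k,
          Int.mul_ediv_cancel_left _ (by omega : (2:Int) ≠ 0)]
    -- one element of block q of the range, as the child's element
    have hDref : ∀ (q r : Nat), r < 4 ^ k →
        Dref (k+1) ((q * 4 ^ k + r : Nat) : Int) = stepR ((2:Int) ^ k) (q : Int) (Dref k (r : Int)) := by
      intro q r hr
      have hcast : ((q * 4 ^ k + r : Nat) : Int) = (q : Int) * 4 ^ k + (r : Int) := by push_cast; ring
      rw [Dref, hcast, Dref_high_bits k q r (by positivity) (by positivity)]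
      congr 1
      rw [PySem.Int.floordiv_eq_ediv_of_pos h4k,
          show (q:Int) * 4 ^ k + r = r + (q:Int) * 4 ^ k from by ring,
          Int.add_mul_ediv_right _ _ (by omega : (4:Int) ^ k ≠ 0),
          Int.ediv_eq_zero_of_lt (by positivity) (by exact_mod_cast hr)]
      omega
    rw [pyRecB]
    rw [if_neg (by omega : ¬ (2:Int) ^ (k+1) = 1)]
    simp only [hfd]
    split_ifs with hpr
    · symm
      rw [List.filterMap_eq_nil_iff]
      intro rr hrr
      simp only [List.mem_range] at hrr
      have hb := Dref_bounds (k+1) (rr : Int) (by positivity)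
      have hni := prune_ok w h ox oy a b c d (2 ^ (k+1) - 1) (Dref (k+1) (rr : Int))
        hb.1 (by omega) hb.2.2.1 (by omega) hpr
      simp only [if_neg hni]
    · rw [ih f _ _ _ _ _ _ _ _ (by omega), ih f _ _ _ _ _ _ _ _ (by omega),
          ih f _ _ _ _ _ _ _ _ (by omega), ih f _ _ _ _ _ _ _ _ (by omega)]
      have h4 : (4:Nat) ^ (k+1) = 4 ^ k + (4 ^ k + (4 ^ k + 4 ^ k)) := by ring
      rw [h4]
      simp only [List.range_add, List.map_append, List.map_map, List.filterMap_append,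
        List.filterMap_map]
      rw [List.append_assoc, List.append_assoc]
      congr 1
      · -- block 0
        apply List.filterMap_congr
        intro r hr
        simp only [List.mem_range] at hr
        have := hDref 0 r hr
        rw [show ((0 * 4 ^ k + r : Nat)) = r from by ring] at this
        rw [this, stepR_cases _ _ _ (by positivity)]
        norm_num
        have hg : applyT ox oy a b c d ((Dref k (r:Int)).2, (Dref k (r:Int)).1)
            = applyT ox oy b a d c (Dref k (r:Int)) := by
          simp [applyT]; constructor <;> ring
        rw [hg]
      congr 1
      · -- block 1
        apply List.filterMap_congr
        intro r hr
        simp only [List.mem_range] at hr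
        simp only [Function.comp]
        have := hDref 1 r hr
        rw [show ((1 * 4 ^ k + r : Nat)) = 4 ^ k + r from by ring] at this
        rw [this, stepR_cases _ _ _ (by positivity)]
        norm_num
        have hg : applyT ox oy a b c d ((Dref k (r:Int)).1, (Dref k (r:Int)).2 + 2 ^ k)
            = applyT (ox + b * 2 ^ k) (oy + d * 2 ^ k) a b c d (Dref k (r:Int)) := by
          simp [applyT]; constructor <;> ring
        rw [hg]
      congr 1
      · -- block 2
        apply List.filterMap_congr
        intro r hr
        simp only [List.mem_range] at hr
        simp only [Function.comp]
        have := hDref 2 r hr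
        rw [show ((2 * 4 ^ k + r : Nat)) = 4 ^ k + (4 ^ k + r) from by ring] at this
        rw [this, stepR_cases _ _ _ (by positivity)]
        norm_num
        have hg : applyT ox oy a b c d ((Dref k (r:Int)).1 + 2 ^ k, (Dref k (r:Int)).2 + 2 ^ k)
            = applyT (ox + a * 2 ^ k + b * 2 ^ k) (oy + c * 2 ^ k + d * 2 ^ k) a b c d (Dref k (r:Int)) := by
          simp [applyT]; constructor <;> ring
        rw [hg]
      · -- block 3
        apply List.filterMap_congr
        intro r hr
        simp only [List.mem_range] at hr
        simp only [Function.comp]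
        have := hDref 3 r hr
        rw [show ((3 * 4 ^ k + r : Nat)) = 4 ^ k + (4 ^ k + (4 ^ k + r)) from by ring] at this
        rw [this, stepR_cases _ _ _ (by positivity)]
        norm_num
        have hg : applyT ox oy a b c d (2 * 2 ^ k - 1 - (Dref k (r:Int)).2, 2 ^ k - 1 - (Dref k (r:Int)).1)
            = applyT (ox + a * (2 * 2 ^ k - 1) + b * (2 ^ k - 1)) (oy + c * (2 * 2 ^ k - 1) + d * (2 ^ k - 1))
                (-b) (-a) (-d) (-c) (Dref k (r:Int)) := by
          simp [applyT]; constructor <;> ring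
        rw [hg]


-- searched with exact?/rw?: no library lemma matches this exact shape
theorem filterMap_if_eq_filter_map {α β : Type} (l : List α) (p : α → Bool) (f : α → β) :
    l.filterMap (fun x => if p x then some (f x) else none) = (l.filter p).map f := by
  induction l with
  | nil => rfl
  | cons x xs ih => by_cases h : p x <;> simp [h, ih]

-- ===== VERDICT (by name: the statement is the Claim_ definition above) =====

theorem get_hilbert_curve_spec : Claim_equal_get_hilbert_curve := by
  unfold Claim_equal_get_hilbert_curve
  intro w h _dom
  unfold Spec_get_hilbert_curve
  obtain ⟨k, hk⟩ := size_pow w h 1 (by decide) ⟨0, rfl⟩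
  have hsz : pySizeLoopB w h 1 (by decide) = 2 ^ k := by
    rw [← sizeAB w h 1 (by decide)]; exact hk
  have htn : ((2:Int) ^ k).toNat = 2 ^ k := by
    rw [show ((2:Int) ^ k) = ((2 ^ k : Nat) : Int) from by push_cast; rfl, Int.toNat_natCast]
  have hB : get_hilbert_curve_alt w h
      = pyRecB (2 ^ k) w h ((2:Int) ^ k) 0 0 1 0 0 1 := by
    rw [get_hilbert_curve_alt]
    simp only [hsz, htn]
  rw [hB, recB_eq k (2 ^ k) w h 0 0 1 0 0 1 (Nat.lt_two_pow_self)]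
  rw [get_hilbert_curve]
  rw [hk]
  have hrange : PySem.List.pyRange 0 ((2:Int) ^ k * 2 ^ k) 1
      = (List.range ((4:Nat) ^ k)).map (fun (j : Nat) => (0 : Int) + j) := by
    rw [PySem.List.pyRange_one]
    congr 1
    have hcast : ((4 ^ k : Nat) : Int) = 2 ^ k * 2 ^ k := by
      push_cast
      rw [show (4:Int) = 2 * 2 from rfl, mul_pow]
    rw [show ((2:Int) ^ k * 2 ^ k - 0) = ((4 ^ k : Nat) : Int) from by rw [hcast]; ring,
        Int.toNat_natCast]
  rw [hrange, List.foldl_map]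
  have hbody : (fun (acc : List (List Int)) (j : Nat) =>
        if (pyD2xyA (2 ^ k) ((0:Int) + j)).1 < w ∧ (pyD2xyA (2 ^ k) ((0:Int) + j)).2 < h
        then acc ++ [[(pyD2xyA (2 ^ k) ((0:Int) + j)).1, (pyD2xyA (2 ^ k) ((0:Int) + j)).2]] else acc)
      = (fun acc j =>
        if (fun (j : Nat) => decide ((pyD2xyA (2 ^ k) ((0:Int) + j)).1 < w ∧ (pyD2xyA (2 ^ k) ((0:Int) + j)).2 < h)) j
        then acc ++ [(fun (j : Nat) => [(pyD2xyA (2 ^ k) ((0:Int) + j)).1, (pyD2xyA (2 ^ k) ((0:Int) + j)).2]) j] else acc) := by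
    funext acc j
    by_cases hc : (pyD2xyA (2 ^ k) ((0:Int) + j)).1 < w ∧ (pyD2xyA (2 ^ k) ((0:Int) + j)).2 < h <;>
      simp [hc]
  show (List.range (4 ^ k)).foldl _ [] = _
  rw [hbody, PySem.List.foldl_append_if, List.nil_append, ← filterMap_if_eq_filter_map]
  apply List.filterMap_congr
  intro r hr
  have hD : pyD2xyA ((2:Int) ^ k) ((0:Int) + r) = Dref k (r : Int) := by
    rw [show ((0:Int) + r) = (r : Int) from by ring]
    rw [pyD2xyA, show ((2:Int) ^ k) = 1 * 2 ^ k from by ring, loop_eq_Ek,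
        Ek_one_eq_Dref k (r : Int) (by positivity)]
  have happ : applyT 0 0 1 0 0 1 (Dref k (r : Int)) = Dref k (r : Int) := by
    simp [applyT]
  rw [hD, happ]
  by_cases hc : (Dref k (r:Int)).1 < w ∧ (Dref k (r:Int)).2 < h <;> simp [hc]
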